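-- pv_equiv track=rewrite | github.com/jeppe742/QuantBoxPy | seperability/helpers.py | sym_vectors
-- ===== SOURCE A (Python) =====
-- def sym_vectors(d, k):
--     """
--     Caculates all the symmetric vectors that span Sym^k(ℂ^d).
--     This corresponds, to finding all combinations of numbers n=(n_1, n_2,..,n_d) such that Σ n_i=k
--
--     :param d: local dimensions of our system. Or the number of elements in n
--     :param k: Number of symmetric extensions. Or the sum of elements in n
--
--
--     EX:
--     >>> sym_vectors(2,3)
--     [[3,0]
--      [2,1]
--      [1,2]
--      [0,3]]
--     """
--     vectors = []
--     if d == 1: #tail of the recursive call.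
--         vectors.append(k)
--         return vectors
--     #Try the different combinations for the first number, and recursively call the rest of the d-1 numbers, for which the sum now needs to be k-i
--     for i in range(k, -1, -1):
--         for vector in sym_vectors(d-1, k-i):
--             tmp_vector = []
--             #Make sure vector is a list
--             if not isinstance(vector, list):
--                 vector = [vector]
--             #Stitch the results together in a list
--             tmp_vector.extend([i])
--             tmp_vector.extend(vector)
--             vectors.append(tmp_vector)
--     return vectors
-- ===== SOURCE B (Python) =====
-- def sym_vectors(d, k):
--     # Iterative breadth-first expansion: grow all prefixes position by
--     # position, keeping the remaining sum; no recursion.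
--     parts = [([], k)]
--     for _ in range(d - 1):
--         parts = [(p + [i], r - i) for (p, r) in parts for i in range(r, -1, -1)]
--         if not parts:
--             return []
--     return [p + [r] for (p, r) in parts]
-- ===== Notes on version B (the rewrite author's own statement) =====
-- stated objective: simpler
-- what changed: Replaces A's recursion on the first coordinate (with its isinstance list-wrapping of the flat base case) by a short non-recursive breadth-first expansion that grows all prefixes position by position while tracking the remaining sum.
-- outside the precondition, e.g. on sym_vectors(1, 3): A returns [3], B returns [[3]]
import Mathlib
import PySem

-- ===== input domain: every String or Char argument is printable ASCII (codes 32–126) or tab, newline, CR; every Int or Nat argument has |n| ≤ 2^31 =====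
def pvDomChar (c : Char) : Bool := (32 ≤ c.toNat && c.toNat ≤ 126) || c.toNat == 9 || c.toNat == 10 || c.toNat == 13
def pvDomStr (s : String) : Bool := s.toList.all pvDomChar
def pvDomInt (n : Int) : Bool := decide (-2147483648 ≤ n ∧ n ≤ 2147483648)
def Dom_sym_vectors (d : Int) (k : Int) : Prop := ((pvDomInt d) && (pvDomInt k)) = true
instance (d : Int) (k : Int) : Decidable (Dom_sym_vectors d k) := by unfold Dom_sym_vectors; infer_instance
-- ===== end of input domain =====

-- B replaces A's recursion on the first coordinate by a short non-recursive
-- breadth-first expansion of prefixes (objective: simpler, same cost).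

-- ===== PORT A =====
-- Recursion measured by d.toNat (Python recurses on d-1 and only d ≥ 2 reaches
-- the recursive branch inside Pre_).  Python's base case returns the flat list
-- [k]; its callers immediately re-wrap that int with the isinstance check, so
-- the base case is modelled as [[k]] (the int k, wrapped).  At top level this
-- wrapping is only visible for d == 1, which Pre_ excludes (A's flat [k] is
-- not a value of type List (List Int) there).
def symAuxA : Nat → Int → List (List Int)
  | 0, _ => []                                     -- d ≤ 0: Python never returns (RecursionError); outside Pre_
  | 1, k => [[k]]
  | (m+2), k =>
      (PySem.List.pyRange k (-1) (-1)).foldl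
        (fun acc i => acc ++ (symAuxA (m+1) (k - i)).map (fun v => [i] ++ v)) []

def sym_vectors (d : Int) (k : Int) : List (List Int) := symAuxA d.toNat k

-- ===== PORT B =====
-- One expansion step: every prefix (p, r) is extended by each possible next
-- entry i = r, r-1, …, 0, remainder r - i.
def pvStepB (ps : List (List Int × Int)) : List (List Int × Int) :=
  ps.flatMap (fun pr => (PySem.List.pyRange pr.2 (-1) (-1)).map (fun i => (pr.1 ++ [i], pr.2 - i)))

-- The 'for _ in range(d-1)' loop (with its 'if not parts: return []' break)
-- runs at most (d-1).toNat times, counted by the fuel argument.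
def pvLoopB : Nat → List (List Int × Int) → List (List Int)
  | 0, ps => ps.map (fun pr => pr.1 ++ [pr.2])
  | (n+1), ps =>
      let ps' := pvStepB ps
      if ps' = [] then [] else pvLoopB n ps'

def sym_vectors_alt (d : Int) (k : Int) : List (List Int) :=
  pvLoopB (d - 1).toNat [(([] : List Int), k)]

-- ===== PRECONDITION & SPEC =====
-- Pre_ excludes d ≤ 0, where A never returns (RecursionError), and d == 1,
-- where A returns the flat list [k] — an int list, not a value of the declared
-- type List (List Int).
def Pre_sym_vectors (d : Int) (k : Int) : Prop := 2 ≤ d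
instance (d : Int) (k : Int) : Decidable (Pre_sym_vectors d k) := by unfold Pre_sym_vectors; infer_instance
def pvWitness_sym_vectors : Int × Int := (3, 2)

def Spec_sym_vectors (d : Int) (k : Int) (out : List (List Int)) : Prop := out = sym_vectors_alt d k
instance (d : Int) (k : Int) (out : List (List Int)) : Decidable (Spec_sym_vectors d k out) := by unfold Spec_sym_vectors; infer_instance

-- ===== CLAIM (what is proved, stated in full; the proofs are below) =====
def Claim_equal_sym_vectors : Prop := ∀ (d : Int) (k : Int), Dom_sym_vectors d k → Pre_sym_vectors d k → Spec_sym_vectors d k (sym_vectors d k)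

-- ===== LEMMAS AND PROOFS =====

theorem pvStepB_nil : pvStepB [] = [] := rfl

theorem pvStepB_append (as bs : List (List Int × Int)) :
    pvStepB (as ++ bs) = pvStepB as ++ pvStepB bs := by
  simp [pvStepB]

theorem pvStepB_iter_nil (n : ℕ) : pvStepB^[n] [] = [] := by
  induction n with
  | zero => rfl
  | succ n ih => rw [Function.iterate_succ_apply, pvStepB_nil, ih]

theorem pvStepB_iter_append (n : ℕ) (as bs : List (List Int × Int)) :
    pvStepB^[n] (as ++ bs) = pvStepB^[n] as ++ pvStepB^[n] bs := by
  induction n generalizing as bs with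
  | zero => rfl
  | succ n ih => rw [Function.iterate_succ_apply, Function.iterate_succ_apply,
      Function.iterate_succ_apply, pvStepB_append, ih]

-- Iterating the step over a mapped list splits elementwise.
theorem pvStepB_iter_map {α : Type} (n : ℕ) (l : List α) (g : α → List Int × Int) :
    (pvStepB^[n] (l.map g)).map (fun pr => pr.1 ++ [pr.2]) =
      l.flatMap (fun x => (pvStepB^[n] [g x]).map (fun pr => pr.1 ++ [pr.2])) := by
  induction l with
  | nil => simp [pvStepB_iter_nil]
  | cons c t ih =>
      have : (c :: t).map g = [g c] ++ t.map g := by simp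
      rw [this, pvStepB_iter_append, List.map_append, ih, List.flatMap_cons]

-- Key invariant: n expansion steps from a single prefix (p0, k) produce
-- exactly A's recursive solutions for n+1 positions, each prefixed by p0.
theorem pv_key (n : ℕ) : ∀ (k : Int) (p0 : List Int),
    (pvStepB^[n] [(p0, k)]).map (fun pr => pr.1 ++ [pr.2]) =
      (symAuxA (n + 1) k).map (fun v => p0 ++ v) := by
  induction n with
  | zero => intro k p0; simp [symAuxA]
  | succ n ih =>
      intro k p0
      rw [Function.iterate_succ_apply]
      have hstep : pvStepB [(p0, k)] =
          (PySem.List.pyRange k (-1) (-1)).map (fun i => (p0 ++ [i], k - i)) := by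
        simp [pvStepB]
      rw [hstep, pvStepB_iter_map]
      have hA : symAuxA (n + 1 + 1) k =
          (PySem.List.pyRange k (-1) (-1)).flatMap
            (fun i => (symAuxA (n + 1) (k - i)).map (fun v => [i] ++ v)) := by
        show (PySem.List.pyRange k (-1) (-1)).foldl
            (fun acc i => acc ++ (symAuxA (n + 1) (k - i)).map (fun v => [i] ++ v)) [] = _
        rw [PySem.List.foldl_append_eq_flatMap]; simp
      rw [hA]
      simp only [List.map_flatMap, List.map_map]
      refine List.flatMap_congr (fun i _ => ?_)
      rw [ih (k - i) (p0 ++ [i])]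
      simp [Function.comp, List.append_assoc]

-- The fuelled loop with its empty-break computes exactly the n-fold step iteration.
theorem pvLoopB_eq (n : ℕ) : ∀ (ps : List (List Int × Int)),
    pvLoopB n ps = (pvStepB^[n] ps).map (fun pr => pr.1 ++ [pr.2]) := by
  induction n with
  | zero => intro ps; rfl
  | succ n ih =>
      intro ps
      show (if pvStepB ps = [] then [] else pvLoopB n (pvStepB ps)) = _
      rw [Function.iterate_succ_apply]
      by_cases h : pvStepB ps = []
      · rw [if_pos h, h, pvStepB_iter_nil]; rfl
      · rw [if_neg h, ih]

-- ===== VERDICT (by name: the statement is the Claim_ definition above) =====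
theorem sym_vectors_spec : Claim_equal_sym_vectors := by
  intro d k _ hpre
  unfold Spec_sym_vectors sym_vectors sym_vectors_alt
  rw [pvLoopB_eq]
  have hn : (d - 1).toNat + 1 = d.toNat := by
    unfold Pre_sym_vectors at hpre; omega
  rw [← hn, pv_key ((d - 1).toNat) k []]
  simp
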